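-- pv_equiv track=rewrite | github.com/June-Li/DuToolkit | MODELALG/utils/sdnlp_libs/base/hypertxt.py | cut_sentences_0804
-- ===== SOURCE A (Python) =====
-- def find_cut_indices(para, max_len=510):
--     # 定义用于分割句子的结束标点
--     end_punctuations_single = {'。', '!', '！', '？', '?'}
--     end_punctuations_multi = {'……', '......'}
--     end_punctuation_followers = {'”', '’', '）', ')'}
--
--     # 分割句子的起始点
--     indices = [0]
--
--     i = 0
--     while i < len(para):
--         next_char = para[min(i + 1, len(para) - 1)]  # 下一个字符
--
--         # 根据单字符结束标点进行分句
--         if para[i] in end_punctuations_single and next_char not in end_punctuation_followers: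
--             indices.append(i + 1)
--         # 根据多字符结束标点进行分句
--         elif i + 5 < len(para) and para[
--                                    i:i + 6] in end_punctuations_multi and next_char not in end_punctuation_followers:
--             indices.append(i + 6)
--
--         i += 1
--
--     return indices
--
-- def split_sentences(para, indices):
--     """
--     根据分割点切割句子
--
--     :param para: 输入的段落
--     :param indices: 分割点列表
--     :return: 返回一个列表，包含了所有的句子
--     """
--     # 如果indices为空，返回整个段落作为一个句子
--     if not indices:
--         return [para]
--
--     sentences = [para[i:j] for i, j in zip(indices, indices[1:] + [None])]
--     return sentences
--
-- def split_long_sentence(sentence, max_len):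
--     split_punctuations = {':', '：', ';', '；'}
--     indices = [0]
--
--     # 如果句子长度大于max_len，进行分割
--     if len(sentence) > max_len:
--         for i, char in enumerate(sentence):
--             if char in split_punctuations:  # 根据分隔符进行分句
--                 indices.append(i + 1)
--         sentences = [sentence[i:j] for i, j in zip(indices, indices[1:] + [None])]
--
--         # 根据max_len进行最后的分割，并记录分割下标
--         final_sentences = []
--         final_indices = []
--         for idx, new_sentence in zip(indices, sentences):
--             while len(new_sentence) > max_len:
--                 final_sentences.append(new_sentence[:max_len])
--                 final_indices.append(idx)
--                 new_sentence = new_sentence[max_len:]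
--                 idx += max_len  # 更新当前子句的起始索引
--             final_sentences.append(new_sentence)
--             final_indices.append(idx)
--     else:
--         # 句子长度小于max_len，无需分割
--         final_sentences = [sentence]
--         final_indices = [0]
--
--     return final_sentences, final_indices
--
-- def cut_sentences_0804(para, max_len=510):
--     """
--     综合以上函数进行分句
--
--     :param para: 输入的段落
--     :param max_len: 句子的最大长度
--     :return: 返回分割点列表和句子列表
--     """
--     indices = find_cut_indices(para)  # 找到所有的分割点
--     sentences = split_sentences(para, indices)  # 根据分割点切割句子
--     final_sentences = []
--     final_indices = []
--     for sentence in sentences: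
--         final_sentence, final_indice = split_long_sentence(sentence, max_len)
--         if len(final_sentence) > 0:
--             final_sentences.append(final_sentence)  # [[text1, text2], ]
--             final_indices.append(final_indice)
--     return final_sentences, indices, final_indices  # 返回分割点列表和句子列表
-- ===== SOURCE B (Python) =====
-- def cut_sentences_0804(para, max_len=510):
--     singles = {'。', '!', '！', '？', '?'}
--     multis = {'……', '......'}
--     followers = {'”', '’', '）', ')'}
--     split_punct = {':', '：', ';', '；'}
--     n = len(para)
--
--     # single fused scan: record cut indices and emit the sentence segments directly
--     indices = [0]
--     segments = []
--     start = 0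
--     for i in range(n):
--         nxt = para[i + 1] if i + 1 < n else para[n - 1]
--         if nxt in followers:
--             continue
--         if para[i] in singles:
--             cut = i + 1
--         elif i + 5 < n and para[i:i + 6] in multis:
--             cut = i + 6
--         else:
--             continue
--         indices.append(cut)
--         segments.append(para[start:cut])
--         start = cut
--     segments.append(para[start:])
--
--     # second pass: per-segment max_len chunking via counted slices
--     final_sentences = []
--     final_indices = []
--     for seg in segments:
--         if len(seg) <= max_len:
--             final_sentences.append([seg])
--             final_indices.append([0])
--             continue
--         pieces = []
--         p_start = 0
--         for j, ch in enumerate(seg):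
--             if ch in split_punct:
--                 pieces.append((p_start, seg[p_start:j + 1]))
--                 p_start = j + 1
--         pieces.append((p_start, seg[p_start:]))
--         chunks = []
--         starts = []
--         for p_start, piece in pieces:
--             q = max(1, -(-len(piece) // max_len))
--             chunks.extend(piece[k * max_len:(k + 1) * max_len] for k in range(q))
--             starts.extend(p_start + k * max_len for k in range(q))
--         final_sentences.append(chunks)
--         final_indices.append(starts)
--     return final_sentences, indices, final_indices
-- ===== Notes on version B (the rewrite author's own statement) =====
-- stated objective: alternative
-- what changed: B fuses find_cut_indices and split_sentences into one scan that emits cut indices and sentence segments together (no index-then-zip step), and replaces the while-loop that peels max_len prefixes by computing the chunk count q = ceil(len/m) once and slicing chunks with a counted comprehension.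
import Mathlib
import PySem

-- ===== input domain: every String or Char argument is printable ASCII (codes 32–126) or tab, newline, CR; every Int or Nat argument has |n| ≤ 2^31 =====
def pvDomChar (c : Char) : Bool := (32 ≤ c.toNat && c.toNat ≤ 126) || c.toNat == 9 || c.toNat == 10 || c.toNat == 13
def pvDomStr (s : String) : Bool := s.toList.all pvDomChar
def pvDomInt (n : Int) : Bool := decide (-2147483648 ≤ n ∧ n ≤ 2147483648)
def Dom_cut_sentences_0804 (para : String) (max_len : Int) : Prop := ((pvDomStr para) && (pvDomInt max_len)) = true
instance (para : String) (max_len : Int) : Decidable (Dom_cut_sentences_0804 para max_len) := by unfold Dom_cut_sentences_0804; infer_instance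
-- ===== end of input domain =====

-- B fuses the cut-index search and the sentence slicing into one scan, and replaces A's
-- while-loop peeling of max_len prefixes by a counted comprehension of slices (objective: alternative decomposition).

-- shared punctuation constants (the same literal sets both Pythons define)
def pvSingles : List Char := ['。', '!', '！', '？', '?']
def pvMultis : List (List Char) := ["……".toList, "......".toList]
def pvFollowers : List Char := ['”', '’', '）', ')']
def pvSplitPuncts : List Char := [':', '：', ';', '；']

-- ===== PORT A =====
-- find_cut_indices' while-loop: the cut indices appended from position i on (indexing is in range under the guard)
-- (fuel only makes the while-loop structural; fuel = para.length always suffices)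
def pvFindCutsA (para : List Char) (fuel i : Nat) : List Int :=
  match fuel with
  | 0 => []
  | fuel + 1 =>
    if i < para.length then
      let nextChar := para.getD (min (i + 1) (para.length - 1)) ' '
      (if para.getD i ' ' ∈ pvSingles ∧ nextChar ∉ pvFollowers then [((i : Int) + 1)]
       else if i + 5 < para.length ∧ PySem.List.slice para (some (i : Int)) (some ((i : Int) + 6)) ∈ pvMultis ∧ nextChar ∉ pvFollowers then [((i : Int) + 6)]
       else []) ++ pvFindCutsA para fuel (i + 1)
    else []

def pvFindCutIndicesA (para : List Char) : List Int := 0 :: pvFindCutsA para para.length 0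

def pvSplitSentencesA (para : List Char) (indices : List Int) : List (List Char) :=
  if indices = [] then [para]
  else (indices.zip ((indices.drop 1).map some ++ [none])).map
    (fun ij => PySem.List.slice para (some ij.1) ij.2)

-- the 'while len(new_sentence) > max_len' peeling loop of split_long_sentence
-- (the '0 < maxLen' conjunct only makes the recursion total: Python diverges there, excluded by Pre_)
def pvPeelA (fuel : Nat) (ns : List Char) (idx maxLen : Int) : List (List Char) × List Int :=
  match fuel with
  | 0 => ([ns], [idx])
  | fuel + 1 =>
    if maxLen < (ns.length : Int) ∧ 0 < maxLen then
      let r := pvPeelA fuel (PySem.List.slice ns (some maxLen) none) (idx + maxLen) maxLen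
      (PySem.List.slice ns none (some maxLen) :: r.1, idx :: r.2)
    else ([ns], [idx])

def pvSplitLongA (sentence : List Char) (maxLen : Int) : List (List Char) × List Int :=
  if maxLen < (sentence.length : Int) then
    let indices : List Int := 0 :: (PySem.List.enumerate sentence 0).filterMap
        (fun ic => if ic.2 ∈ pvSplitPuncts then some (ic.1 + 1) else none)
    let sentences := (indices.zip ((indices.drop 1).map some ++ [none])).map
        (fun ij => PySem.List.slice sentence (some ij.1) ij.2)
    (indices.zip sentences).foldl
      (fun acc p => (acc.1 ++ (pvPeelA p.2.length p.2 p.1 maxLen).1, acc.2 ++ (pvPeelA p.2.length p.2 p.1 maxLen).2)) ([], [])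
  else ([sentence], [0])

def cut_sentences_0804 (para : String) (max_len : Int) : List (List String) × List Int × List (List Int) :=
  let p := para.toList
  let indices := pvFindCutIndicesA p
  let sentences := pvSplitSentencesA p indices
  let res := sentences.foldl
    (fun acc s =>
      if (pvSplitLongA s max_len).1.length > 0 then
        (acc.1 ++ [(pvSplitLongA s max_len).1], acc.2 ++ [(pvSplitLongA s max_len).2])
      else acc) ([], [])
  (res.1.map (fun l => l.map (fun cs => String.ofList cs)), indices, res.2)

-- ===== PORT B =====
-- fused scan: cut indices and the sentence segments in one pass (all slice bounds are in-range Nats,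
-- so Python's para[start:cut] is exactly drop/take)
def pvScanB (para : List Char) (fuel i start : Nat) : List Int × List (List Char) :=
  match fuel with
  | 0 => ([], [para.drop start])
  | fuel + 1 =>
    if i < para.length then
      let nxt := if i + 1 < para.length then para.getD (i + 1) ' ' else para.getD (para.length - 1) ' '
      if nxt ∈ pvFollowers then pvScanB para fuel (i + 1) start
      else if para.getD i ' ' ∈ pvSingles then
        let r := pvScanB para fuel (i + 1) (i + 1)
        (((i : Int) + 1) :: r.1, (para.drop start).take (i + 1 - start) :: r.2)
      else if i + 5 < para.length ∧ (para.drop i).take 6 ∈ pvMultis then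
        let r := pvScanB para fuel (i + 1) (i + 6)
        (((i : Int) + 6) :: r.1, (para.drop start).take (i + 6 - start) :: r.2)
      else pvScanB para fuel (i + 1) start
    else ([], [para.drop start])

-- fused scan of a segment for split punctuation, emitting (piece start, piece) pairs
def pvPiecesB (seg : List Char) (fuel j pstart : Nat) : List (Int × List Char) :=
  match fuel with
  | 0 => [((pstart : Int), seg.drop pstart)]
  | fuel + 1 =>
    if j < seg.length then
      if seg.getD j ' ' ∈ pvSplitPuncts then
        ((pstart : Int), (seg.drop pstart).take (j + 1 - pstart)) :: pvPiecesB seg fuel (j + 1) (j + 1)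
      else pvPiecesB seg fuel (j + 1) pstart
    else [((pstart : Int), seg.drop pstart)]

-- q = max(1, -(-len(piece)//max_len)) chunks, produced by counted slices
def pvChunksB (pstart : Int) (piece : List Char) (m : Int) : List (List Char) × List Int :=
  (((List.range (max 1 (-(PySem.Int.floordiv (-(piece.length : Int)) m))).toNat).map
      (fun k => (piece.drop (k * m.toNat)).take m.toNat)),
   ((List.range (max 1 (-(PySem.Int.floordiv (-(piece.length : Int)) m))).toNat).map
      (fun (k : Nat) => pstart + (k : Int) * m)))

def pvSegB (seg : List Char) (m : Int) : List (List Char) × List Int :=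
  if (seg.length : Int) ≤ m then ([seg], [(0 : Int)])
  else (pvPiecesB seg seg.length 0 0).foldl
    (fun acc pr => (acc.1 ++ (pvChunksB pr.1 pr.2 m).1, acc.2 ++ (pvChunksB pr.1 pr.2 m).2)) ([], [])

def cut_sentences_0804_alt (para : String) (max_len : Int) : List (List String) × List Int × List (List Int) :=
  let p := para.toList
  let sc := pvScanB p p.length 0 0
  let outs := sc.2.map (fun seg => pvSegB seg max_len)
  (outs.map (fun pr => pr.1.map (fun cs => String.ofList cs)), (0 : Int) :: sc.1, outs.map Prod.snd)

-- ===== PRECONDITION & SPEC =====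
-- Pre_ excludes exactly the inputs where Python A DIVERGES: with a non-positive max_len the peeling
-- while-loop never terminates as soon as some sentence is nonempty; the one returning corner of that
-- region (the empty paragraph at a zero max_len) is kept inside Pre_ by the second disjunct.
def Pre_cut_sentences_0804 (para : String) (max_len : Int) : Prop :=
  1 ≤ max_len ∨ (para = "" ∧ max_len = 0)
instance (para : String) (max_len : Int) : Decidable (Pre_cut_sentences_0804 para max_len) := by
  unfold Pre_cut_sentences_0804; infer_instance

def pvWitness_cut_sentences_0804 : String × Int := ("Hi! ok? a:bb;ccc!", 3)

def Spec_cut_sentences_0804 (para : String) (max_len : Int) (out : List (List String) × List Int × List (List Int)) : Prop := out = cut_sentences_0804_alt para max_len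
instance (para : String) (max_len : Int) (out : List (List String) × List Int × List (List Int)) : Decidable (Spec_cut_sentences_0804 para max_len out) := by unfold Spec_cut_sentences_0804; infer_instance

-- ===== CLAIM (what is proved, stated in full; the proofs are below) =====
def Claim_equal_cut_sentences_0804 : Prop := ∀ (para : String) (max_len : Int), Dom_cut_sentences_0804 para max_len → Pre_cut_sentences_0804 para max_len → Spec_cut_sentences_0804 para max_len (cut_sentences_0804 para max_len)

-- ===== LEMMAS AND PROOFS =====

-- the slice sequence determined by a start position and a list of cut positions
def sliceSeq (xs : List Char) (s : Nat) : List Int → List (List Char)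
  | [] => [xs.drop s]
  | c :: cs => ((xs.drop s).take (c.toNat - s)) :: sliceSeq xs c.toNat cs

-- start/slice pairs (what zip(indices, sentences) produces)
def pairSeq (xs : List Char) (s : Nat) : List Int → List (Int × List Char)
  | [] => [((s : Int), xs.drop s)]
  | c :: cs => ((s : Int), (xs.drop s).take (c.toNat - s)) :: pairSeq xs c.toNat cs

-- the inner cut positions split_long_sentence collects from enumerate
def pvPcuts (l : List Char) (s : Int) : List Int :=
  (PySem.List.enumerate l s).filterMap (fun ic => if ic.2 ∈ pvSplitPuncts then some (ic.1 + 1) else none)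

lemma pcuts_cons (c : Char) (l : List Char) (s : Int) :
    pvPcuts (c :: l) s = (if c ∈ pvSplitPuncts then [s + 1] else []) ++ pvPcuts l (s + 1) := by
  simp only [pvPcuts, PySem.List.enumerate_cons, List.filterMap_cons]
  split <;> simp_all

lemma pcuts_nonneg : ∀ (l : List Char) (s : Int), 0 ≤ s → ∀ c ∈ pvPcuts l s, 0 ≤ c := by
  intro l
  induction l with
  | nil => intro s hs c hc; simp [pvPcuts, PySem.List.enumerate] at hc
  | cons x t ih =>
    intro s hs c hc
    rw [pcuts_cons] at hc
    rcases List.mem_append.mp hc with h | h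
    · split at h <;> simp at h; omega
    · exact ih (s + 1) (by omega) c h

lemma zipSlices_eq (xs : List Char) (cuts : List Int) (s : Nat)
    (hnn : ∀ c ∈ cuts, 0 ≤ c) :
    ((((s : Int) :: cuts).zip ((((s : Int) :: cuts).drop 1).map some ++ [none])).map
      (fun ij => PySem.List.slice xs (some ij.1) ij.2)) = sliceSeq xs s cuts := by
  induction cuts generalizing s with
  | nil => simp [sliceSeq, PySem.List.slice_from_natCast]
  | cons c cs ih =>
    have hc : (0 : Int) ≤ c := hnn c (by simp)
    have hcast : c = ((c.toNat : Nat) : Int) := (Int.toNat_of_nonneg hc).symm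
    have ih' := ih c.toNat (fun d hd => hnn d (by simp [hd]))
    rw [hcast]
    simp only [List.drop_succ_cons, List.drop_zero, List.map_cons, List.cons_append,
      List.zip_cons_cons, sliceSeq, Int.toNat_natCast]
    rw [hcast] at ih'
    simp only [List.drop_succ_cons, List.drop_zero, Int.toNat_natCast] at ih'
    rw [PySem.List.slice_natCast, ih']

lemma zip_pairSeq (xs : List Char) : ∀ (cuts : List Int) (s : Nat),
    (∀ c ∈ cuts, 0 ≤ c) →
    (((s : Int) :: cuts).zip (sliceSeq xs s cuts)) = pairSeq xs s cuts := by
  intro cuts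
  induction cuts with
  | nil => intro s _; simp [sliceSeq, pairSeq]
  | cons c cs ih =>
    intro s hnn
    have hc : (0 : Int) ≤ c := hnn c (by simp)
    have hcast : c = ((c.toNat : Nat) : Int) := (Int.toNat_of_nonneg hc).symm
    have ih' := ih c.toNat (fun d hd => hnn d (by simp [hd]))
    simp only [sliceSeq, pairSeq, List.zip_cons_cons]
    rw [hcast]
    simp only [Int.toNat_natCast]
    rw [ih']

lemma pairSeq_ne_nil (xs : List Char) (s : Nat) (cuts : List Int) : pairSeq xs s cuts ≠ [] := by
  cases cuts <;> simp [pairSeq]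

lemma findCuts_nonneg (para : List Char) : ∀ (fuel i : Nat),
    ∀ c ∈ pvFindCutsA para fuel i, 0 ≤ c := by
  intro fuel
  induction fuel with
  | zero =>
    intro i c hc
    rw [pvFindCutsA] at hc
    simp at hc
  | succ n ih =>
    intro i c hc
    by_cases hi : i < para.length
    · rw [pvFindCutsA, if_pos hi] at hc
      rcases List.mem_append.mp hc with h1 | h1
      · split at h1
        · simp at h1; omega
        · split at h1 <;> simp at h1; omega
      · exact ih (i + 1) c h1
    · rw [pvFindCutsA, if_neg hi] at hc
      simp at hc

lemma scan_eq (para : List Char) : ∀ (fuel i start : Nat), para.length - i ≤ fuel →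
    pvScanB para fuel i start
      = (pvFindCutsA para fuel i, sliceSeq para start (pvFindCutsA para fuel i)) := by
  intro fuel
  induction fuel with
  | zero =>
    intro i start h
    rw [pvScanB, pvFindCutsA]
    simp [sliceSeq]
  | succ n ih =>
    intro i start h
    by_cases hi : i < para.length
    · rw [pvScanB, pvFindCutsA]
      simp only [if_pos hi]
      have hnxt : para.getD (min (i + 1) (para.length - 1)) ' ' =
          (if i + 1 < para.length then para.getD (i + 1) ' ' else para.getD (para.length - 1) ' ') := by
        by_cases h2 : i + 1 < para.length
        · rw [if_pos h2]; congr 1; omega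
        · rw [if_neg h2]; congr 1; omega
      have hsl : PySem.List.slice para (some (i : Int)) (some ((i : Int) + 6)) = (para.drop i).take 6 := by
        have h6 : ((i : Int) + 6) = (((i + 6 : Nat)) : Int) := by push_cast; ring
        rw [h6, PySem.List.slice_natCast]
        congr 1
        omega
      have ht1 : ((i : Int) + 1).toNat = i + 1 := by omega
      have ht6 : ((i : Int) + 6).toNat = i + 6 := by omega
      rw [hnxt, hsl]
      set nxt := (if i + 1 < para.length then para.getD (i + 1) ' ' else para.getD (para.length - 1) ' ') with hnxtdef
      by_cases hf : nxt ∈ pvFollowers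
      · have hs1 : ¬ (para.getD i ' ' ∈ pvSingles ∧ nxt ∉ pvFollowers) := by simp [hf]
        have hs2 : ¬ (i + 5 < para.length ∧ (para.drop i).take 6 ∈ pvMultis ∧ nxt ∉ pvFollowers) := by
          simp [hf]
        rw [if_pos hf, if_neg hs1, if_neg hs2]
        simp only [List.nil_append]
        exact ih (i + 1) start (by omega)
      · by_cases hsg : para.getD i ' ' ∈ pvSingles
        · rw [if_neg hf, if_pos hsg, if_pos ⟨hsg, hf⟩]
          rw [ih (i + 1) (i + 1) (by omega)]
          simp [sliceSeq, ht1]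
        · by_cases hmu : i + 5 < para.length ∧ (para.drop i).take 6 ∈ pvMultis
          · rw [if_neg hf, if_neg hsg, if_pos hmu, if_neg (fun hcon => hsg hcon.1),
              if_pos ⟨hmu.1, hmu.2, hf⟩]
            rw [ih (i + 1) (i + 6) (by omega)]
            simp [sliceSeq, ht6]
          · rw [if_neg hf, if_neg hsg, if_neg hmu, if_neg (fun hcon => hsg hcon.1),
              if_neg (fun hcon => hmu ⟨hcon.1, hcon.2.1⟩)]
            simp only [List.nil_append]
            exact ih (i + 1) start (by omega)
    · rw [pvScanB, pvFindCutsA]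
      simp only [if_neg hi]
      simp [sliceSeq]

lemma pieces_eq (seg : List Char) : ∀ (fuel j pstart : Nat), seg.length - j ≤ fuel →
    pvPiecesB seg fuel j pstart = pairSeq seg pstart (pvPcuts (seg.drop j) (j : Int)) := by
  intro fuel
  induction fuel with
  | zero =>
    intro j pstart h
    rw [pvPiecesB]
    have hd : seg.drop j = [] := List.drop_eq_nil_of_le (by omega)
    simp [hd, pvPcuts, pairSeq]
  | succ n ih =>
    intro j pstart h
    by_cases hj : j < seg.length
    · rw [pvPiecesB]
      have hd : seg.drop j = seg[j] :: seg.drop (j + 1) := List.drop_eq_getElem_cons hj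
      have hg : seg.getD j ' ' = seg[j] := List.getD_eq_getElem seg ' ' hj
      rw [hd, pcuts_cons]
      have hcast : ((j : Int) + 1) = (((j + 1 : Nat)) : Int) := by push_cast; ring
      by_cases hp : seg[j] ∈ pvSplitPuncts
      · rw [if_pos hj, if_pos (hg ▸ hp), if_pos hp]
        rw [ih (j + 1) (j + 1) (by omega)]
        simp only [List.cons_append, List.nil_append, pairSeq, hcast, Int.toNat_natCast]
      · rw [if_pos hj, if_neg (hg ▸ hp), if_neg hp]
        rw [ih (j + 1) pstart (by omega), hcast]
        simp only [List.nil_append]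
    · rw [pvPiecesB]
      have hd : seg.drop j = [] := List.drop_eq_nil_of_le (by omega)
      simp [hj, hd, pvPcuts, pairSeq]

-- the ceiling count -(-L // m) through its characterising bracket
lemma ceil_bracket (L m : Int) (hm : 0 < m) :
    (-(PySem.Int.floordiv (-L) m) - 1) * m < L ∧ L ≤ -(PySem.Int.floordiv (-L) m) * m :=
  (PySem.Int.neg_floordiv_neg_eq_iff_of_pos hm).mp rfl

lemma q_eq_one (p : List Char) (m : Int) (hm : 1 ≤ m) (h : (p.length : Int) ≤ m) :
    max 1 (-(PySem.Int.floordiv (-(p.length : Int)) m)) = 1 := by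
  obtain ⟨h1, h2⟩ := ceil_bracket (p.length : Int) m (by omega)
  set c := -(PySem.Int.floordiv (-(p.length : Int)) m) with hc
  have hL : (0 : Int) ≤ (p.length : Int) := by positivity
  have e1 : (c - 1) * m = c * m - m := by ring
  have hcle : c ≤ 1 := by nlinarith
  omega

lemma q_succ (p : List Char) (m : Int) (hm : 1 ≤ m) (h : m < (p.length : Int)) :
    max 1 (-(PySem.Int.floordiv (-(p.length : Int)) m))
      = max 1 (-(PySem.Int.floordiv (-((p.drop m.toNat).length : Int)) m)) + 1 := by
  have hlen : ((p.drop m.toNat).length : Int) = (p.length : Int) - m := by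
    simp only [List.length_drop]
    omega
  obtain ⟨h1, h2⟩ := ceil_bracket ((p.drop m.toNat).length : Int) m (by omega)
  set c := -(PySem.Int.floordiv (-((p.drop m.toNat).length : Int)) m) with hc
  have hL' : (1 : Int) ≤ ((p.drop m.toNat).length : Int) := by rw [hlen]; omega
  have e1 : (c - 1) * m = c * m - m := by ring
  have e2 : (c + 1) * m = c * m + m := by ring
  have hc1 : 1 ≤ c := by nlinarith
  have hmain : -(PySem.Int.floordiv (-((p.length : Int))) m) = c + 1 := by
    rw [PySem.Int.neg_floordiv_neg_eq_iff_of_pos (by omega)]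
    constructor
    · have : (c + 1 - 1) * m = c * m := by ring
      rw [this]
      linarith [h1, hlen.ge, hlen.le]
    · rw [e2]
      linarith [h2, hlen.ge, hlen.le]
  rw [hmain]
  omega

lemma chunks_step (p : List Char) (idx m : Int) (hm : 1 ≤ m) (h : m < (p.length : Int)) :
    pvChunksB idx p m =
      (p.take m.toNat :: (pvChunksB (idx + m) (p.drop m.toNat) m).1,
       idx :: (pvChunksB (idx + m) (p.drop m.toNat) m).2) := by
  unfold pvChunksB
  rw [q_succ p m hm h]
  set c := max 1 (-(PySem.Int.floordiv (-((p.drop m.toNat).length : Int)) m)) with hcdef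
  have hc0 : (0 : Int) ≤ c := by positivity
  have htn : (c + 1).toNat = c.toNat + 1 := by omega
  rw [htn, List.range_succ_eq_map]
  rw [Prod.mk.injEq]
  constructor
  · simp only [List.map_cons, List.map_map, Nat.zero_mul, List.drop_zero]
    congr 1
    apply List.map_congr_left
    intro k _
    simp only [Function.comp_apply, List.drop_drop]
    congr 2
    simp only [Nat.succ_eq_add_one]
    ring
  · simp only [List.map_cons, List.map_map, Nat.cast_zero, zero_mul, add_zero]
    congr 1
    apply List.map_congr_left
    intro k _
    simp only [Function.comp_apply, Nat.succ_eq_add_one]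
    push_cast
    ring

lemma peel_eq_chunks (m : Int) (hm : 1 ≤ m) : ∀ (fuel : Nat) (p : List Char), p.length ≤ fuel →
    ∀ idx, pvPeelA fuel p idx m = pvChunksB idx p m := by
  intro fuel
  induction fuel with
  | zero =>
    intro p hp idx
    have hnil : p = [] := List.length_eq_zero_iff.mp (by omega)
    subst hnil
    rw [pvPeelA]
    unfold pvChunksB
    rw [q_eq_one [] m hm (by simp; omega)]
    simp
  | succ n ih =>
    intro p hp idx
    by_cases hgt : m < (p.length : Int)
    · rw [pvPeelA, if_pos ⟨hgt, by omega⟩]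
      rw [PySem.List.slice_from p (by omega), PySem.List.slice_to p (by omega)]
      rw [chunks_step p idx m hm hgt]
      rw [ih (p.drop m.toNat) (by simp only [List.length_drop]; omega) (idx + m)]
    · rw [pvPeelA, if_neg (by omega)]
      unfold pvChunksB
      rw [q_eq_one p m hm (by omega)]
      have ht : p.take m.toNat = p := List.take_of_length_le (by omega)
      simp [ht]

lemma foldl_pair_append {α β γ : Type} (f : α → List β) (g : α → List γ) :
    ∀ (l : List α) (a : List β) (b : List γ),
    l.foldl (fun acc x => (acc.1 ++ f x, acc.2 ++ g x)) (a, b) = (a ++ l.flatMap f, b ++ l.flatMap g) := by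
  intro l
  induction l with
  | nil => intro a b; simp
  | cons x t ih => intro a b; simp [List.foldl_cons, ih, List.append_assoc]

lemma splitLong_eq_segB (m : Int) (hm : 1 ≤ m) (s : List Char) : pvSplitLongA s m = pvSegB s m := by
  simp only [pvSplitLongA, pvSegB]
  by_cases h : m < (s.length : Int)
  · rw [if_pos h, if_neg (by omega)]
    have hnn : ∀ c ∈ pvPcuts s 0, 0 ≤ c := pcuts_nonneg s 0 le_rfl
    have hpc : (PySem.List.enumerate s 0).filterMap
        (fun ic => if ic.2 ∈ pvSplitPuncts then some (ic.1 + 1) else none) = pvPcuts s 0 := rfl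
    rw [hpc]
    rw [show ((0 : Int) :: pvPcuts s 0) = (((0 : Nat) : Int) :: pvPcuts s 0) by norm_num]
    rw [zipSlices_eq s (pvPcuts s 0) 0 hnn]
    rw [zip_pairSeq s (pvPcuts s 0) 0 hnn]
    rw [pieces_eq s s.length 0 0 (by omega)]
    simp only [List.drop_zero, Nat.cast_zero]
    have hfun : (fun (acc : List (List Char) × List Int) (p : Int × List Char) =>
          (acc.1 ++ (pvPeelA p.2.length p.2 p.1 m).1, acc.2 ++ (pvPeelA p.2.length p.2 p.1 m).2))
        = (fun acc pr => (acc.1 ++ (pvChunksB pr.1 pr.2 m).1, acc.2 ++ (pvChunksB pr.1 pr.2 m).2)) := by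
      funext acc pr
      rw [peel_eq_chunks m hm pr.2.length pr.2 le_rfl pr.1]
    rw [hfun]
  · rw [if_neg h, if_pos (by omega)]

lemma peel_fst_ne_nil (fuel : Nat) (p : List Char) (idx m : Int) : (pvPeelA fuel p idx m).1 ≠ [] := by
  cases fuel with
  | zero => rw [pvPeelA]; simp
  | succ n => rw [pvPeelA]; split <;> simp

lemma splitLong_fst_ne_nil (s : List Char) (m : Int) : (pvSplitLongA s m).1 ≠ [] := by
  simp only [pvSplitLongA]
  split
  · have hnn : ∀ c ∈ pvPcuts s 0, 0 ≤ c := pcuts_nonneg s 0 le_rfl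
    have hpc : (PySem.List.enumerate s 0).filterMap
        (fun ic => if ic.2 ∈ pvSplitPuncts then some (ic.1 + 1) else none) = pvPcuts s 0 := rfl
    rw [hpc]
    rw [show ((0 : Int) :: pvPcuts s 0) = (((0 : Nat) : Int) :: pvPcuts s 0) by norm_num]
    rw [zipSlices_eq s (pvPcuts s 0) 0 hnn]
    rw [zip_pairSeq s (pvPcuts s 0) 0 hnn]
    rw [foldl_pair_append (fun p : Int × List Char => (pvPeelA p.2.length p.2 p.1 m).1) (fun p : Int × List Char => (pvPeelA p.2.length p.2 p.1 m).2)]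
    simp only [List.nil_append]
    rcases hps : pairSeq s 0 (pvPcuts s 0) with _ | ⟨pr, prs⟩
    · exact absurd hps (pairSeq_ne_nil s 0 (pvPcuts s 0))
    · simp only [List.flatMap_cons]
      intro hcon
      exact peel_fst_ne_nil pr.2.length pr.2 pr.1 m (List.append_eq_nil_iff.mp hcon).1
  · simp

lemma foldl_if_append (m : Int) :
    ∀ (l : List (List Char)) (a : List (List (List Char))) (b : List (List Int)),
    l.foldl (fun acc s =>
        if (pvSplitLongA s m).1.length > 0 then
          (acc.1 ++ [(pvSplitLongA s m).1], acc.2 ++ [(pvSplitLongA s m).2])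
        else acc) (a, b)
      = (a ++ l.map (fun s => (pvSplitLongA s m).1), b ++ l.map (fun s => (pvSplitLongA s m).2)) := by
  intro l
  induction l with
  | nil => intro a b; simp
  | cons x t ih =>
    intro a b
    have hx : (pvSplitLongA x m).1.length > 0 := by
      cases hh : (pvSplitLongA x m).1 with
      | nil => exact absurd hh (splitLong_fst_ne_nil x m)
      | cons y ys => simp
    simp only [List.foldl_cons, if_pos hx]
    rw [ih (a ++ [(pvSplitLongA x m).1]) (b ++ [(pvSplitLongA x m).2])]
    simp [List.append_assoc]

-- ===== VERDICT (by name: the statement is the Claim_ definition above) =====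
theorem cut_sentences_0804_spec : Claim_equal_cut_sentences_0804 := by
  intro para m _hdom hpre
  unfold Spec_cut_sentences_0804
  rcases hpre with hm | ⟨hp, hm0⟩
  · simp only [cut_sentences_0804, cut_sentences_0804_alt, pvFindCutIndicesA]
    rw [scan_eq para.toList para.toList.length 0 0 (by omega)]
    have hnn : ∀ c ∈ pvFindCutsA para.toList para.toList.length 0, 0 ≤ c :=
      findCuts_nonneg para.toList para.toList.length 0
    simp only [pvSplitSentencesA]
    rw [if_neg (by simp)]
    rw [show ((0 : Int) :: pvFindCutsA para.toList para.toList.length 0)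
        = (((0 : Nat) : Int) :: pvFindCutsA para.toList para.toList.length 0) by norm_num]
    rw [zipSlices_eq para.toList (pvFindCutsA para.toList para.toList.length 0) 0 hnn]
    rw [foldl_if_append m _ [] []]
    simp only [List.nil_append, Nat.cast_zero]
    simp [splitLong_eq_segB m hm, List.map_map, Function.comp]
  · subst hp; subst hm0
    decide
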